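-- pv_equiv track=rewrite | github.com/grimmlab/drl4procsyn | gumbel_mcts_single.py | get_sequential_halving_simulations_for_levels
-- ===== SOURCE A (Python) =====
-- import math
-- from typing import Optional, List, Dict, Tuple, Union
--
-- def get_sequential_halving_simulations_for_levels(num_actions: int, simulation_budget: int) -> Tuple[
--     List[int], List[int]]:
--     """
--     Given a number of actions and a simulation budget calculates how many simulations
--     in each sequential-halving-level may be used for each action.
--
--     Returns:
--         List[int] Number of actions for each level.
--         List[int] On each level, number of simulations which can be spent on each action.
--     """
--     num_simulations_per_action = []
--     actions_on_levels = []
--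
--     # number of levels if simulations
--     num_levels = math.floor(math.log2(num_actions))
--
--     remaining_actions = num_actions
--     remaining_budget = simulation_budget
--     for level in range(num_levels):
--         if level > 0:
--             remaining_actions = max(2, math.floor(remaining_actions / 2))
--
--         if remaining_budget < remaining_actions:
--             break
--
--         actions_on_levels.append(remaining_actions)
--         num_simulations_per_action.append(
--             max(1, math.floor(simulation_budget / (num_levels * remaining_actions)))
--         )
--         remaining_budget -= num_simulations_per_action[-1] * actions_on_levels[-1]
--
--     if remaining_budget > 0:
--         num_simulations_per_action[-1] += remaining_budget // actions_on_levels[-1]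
--
--     return actions_on_levels, num_simulations_per_action
-- ===== SOURCE B (Python) =====
-- import math
--
-- def get_sequential_halving_simulations_for_levels(num_actions, simulation_budget):
--     # Recursive descent over level indices: level k's action count is given in
--     # closed form (num_actions // 2**k, clamped to >= 2, the full set at level 0)
--     # instead of a running halved variable, and the kept levels' lists are built
--     # by the recursion instead of appends to mutable lists with a break.
--     num_levels = math.floor(math.log2(num_actions))
--
--     def size(k):
--         return num_actions if k == 0 else max(2, num_actions // 2 ** k)
--
--     def go(k, remaining):
--         if k >= num_levels:
--             return [], [], remaining
--         a = size(k)
--         if remaining < a: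
--             return [], [], remaining
--         s = max(1, simulation_budget // (num_levels * a))
--         acts, sims, left = go(k + 1, remaining - a * s)
--         return [a] + acts, [s] + sims, left
--
--     acts, sims, left = go(0, simulation_budget)
--     if left > 0:
--         sims[-1] += left // acts[-1]
--     return acts, sims
-- ===== Notes on version B (the rewrite author's own statement) =====
-- stated objective: alternative
-- what changed: Replaces A's stateful loop (a running halved action count, appends to mutable lists with a break) by a recursive descent over level indices in which each level's action count comes from a closed form (num_actions // 2**k clamped to >= 2) instead of a carried variable and the kept levels' lists are built by the recursion; the leftover-budget distribution into the last level is kept, including its unguarded [-1] access.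
import Mathlib
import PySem

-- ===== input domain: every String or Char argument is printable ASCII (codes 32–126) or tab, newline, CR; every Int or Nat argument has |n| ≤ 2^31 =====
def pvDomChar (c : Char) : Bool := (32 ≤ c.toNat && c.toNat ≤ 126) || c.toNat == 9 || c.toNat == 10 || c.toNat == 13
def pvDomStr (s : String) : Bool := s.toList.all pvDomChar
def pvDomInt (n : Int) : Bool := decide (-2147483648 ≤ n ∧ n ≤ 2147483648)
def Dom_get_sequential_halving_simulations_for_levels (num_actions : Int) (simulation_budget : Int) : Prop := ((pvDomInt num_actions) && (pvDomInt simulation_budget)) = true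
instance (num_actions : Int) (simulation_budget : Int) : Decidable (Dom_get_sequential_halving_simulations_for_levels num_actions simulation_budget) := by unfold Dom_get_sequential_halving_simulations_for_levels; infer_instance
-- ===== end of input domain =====

-- B replaces A's stateful loop + post-pass by a recursive descent with closed-form level
-- sizes and in-recursion leftover absorption (objective: alternative decomposition).

-- ===== PORT A =====

-- A's loop: state (remaining_actions, remaining_budget, actions_on_levels, num_simulations_per_action),
-- 'break' = returning the state; halving happens at the top of every iteration after the first,
-- i.e. each recursive call is entered with the halved value.
def pvLoopA (num_levels simulation_budget : Int) :
    Nat → Int → Int → List Int → List Int → List Int × List Int × Int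
  | 0, _, remaining_budget, acts, sims => (acts, sims, remaining_budget)
  | k + 1, remaining_actions, remaining_budget, acts, sims =>
      if remaining_budget < remaining_actions then (acts, sims, remaining_budget)
      else
        -- math.floor(simulation_budget / (num_levels*remaining_actions)) ported as floordiv:
        -- exact on the stated domain |n| ≤ 2^31 (quotient·divisor stays far below 2^53, so the
        -- double division's floor equals integer floor division)
        let s := max 1 (PySem.Int.floordiv simulation_budget (num_levels * remaining_actions))
        -- math.floor(remaining_actions / 2) ported as floordiv: exact for |remaining_actions| ≤ 2^31
        pvLoopA num_levels simulation_budget k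
          (max 2 (PySem.Int.floordiv remaining_actions 2))
          (remaining_budget - s * remaining_actions)
          (acts ++ [remaining_actions]) (sims ++ [s])

def get_sequential_halving_simulations_for_levels (num_actions : Int) (simulation_budget : Int) : List Int × List Int :=
  -- math.floor(math.log2(num_actions)) ported by hand as Nat.log2: exact for 1 ≤ num_actions ≤ 2^31
  -- (double log2 is exact at powers of two and its rounding error never crosses an integer below 2^31)
  let num_levels : Int := (Nat.log2 num_actions.toNat : Int)
  let t := pvLoopA num_levels simulation_budget num_levels.toNat num_actions simulation_budget [] []
  let acts := t.1
  let sims := t.2.1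
  let rb := t.2.2
  if rb > 0 then
    -- num_simulations_per_action[-1] += remaining_budget // actions_on_levels[-1]
    -- (Python raises IndexError on empty lists; those inputs are outside Pre_)
    match acts.getLast?, sims.getLast? with
    | some al, some sl => (acts, sims.dropLast ++ [sl + PySem.Int.floordiv rb al])
    | _, _ => (acts, sims)
  else (acts, sims)

-- ===== PORT B =====

-- size(k): closed-form action count of level k
def pvSize (num_actions : Int) (k : Nat) : Int :=
  if k = 0 then num_actions else max 2 (PySem.Int.floordiv num_actions (2 ^ k))

-- go(k, remaining): recursion on the number of levels still below num_levels
-- (fuel = num_levels - k, so fuel = 0 is exactly Python's 'k >= num_levels' base case)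
def pvGoB (num_actions num_levels simulation_budget : Int) :
    Nat → Nat → Int → List Int × List Int × Int
  | 0, _, remaining => ([], [], remaining)
  | fuel + 1, k, remaining =>
      let a := pvSize num_actions k
      if remaining < a then ([], [], remaining)
      else
        -- simulation_budget // (num_levels * a)
        let s := max 1 (PySem.Int.floordiv simulation_budget (num_levels * a))
        let t := pvGoB num_actions num_levels simulation_budget fuel (k + 1) (remaining - a * s)
        (a :: t.1, s :: t.2.1, t.2.2)

def get_sequential_halving_simulations_for_levels_alt (num_actions : Int) (simulation_budget : Int) : List Int × List Int :=
  -- math.floor(math.log2(num_actions)) ported by hand as Nat.log2: exact for 1 ≤ num_actions ≤ 2^31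
  let num_levels : Int := (Nat.log2 num_actions.toNat : Int)
  let t := pvGoB num_actions num_levels simulation_budget num_levels.toNat 0 simulation_budget
  if t.2.2 > 0 then
    -- sims[-1] += left // acts[-1]  (Python raises IndexError on empty lists; outside Pre_)
    match t.2.1.getLast? with
    | some sl =>
        match t.1.getLast? with
        | some al => (t.1, t.2.1.dropLast ++ [sl + PySem.Int.floordiv t.2.2 al])
        | none => (t.1, t.2.1)
    | none => (t.1, t.2.1)
  else (t.1, t.2.1)

-- ===== PRECONDITION & SPEC =====
-- Pre_ excludes exactly the inputs where Python A raises: num_actions ≤ 0 (math.log2 ValueError),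
-- and a positive budget with no level kept — num_actions = 1 or 0 < budget < num_actions (IndexError on [-1]).
def Pre_get_sequential_halving_simulations_for_levels (num_actions : Int) (simulation_budget : Int) : Prop :=
  1 ≤ num_actions ∧ (simulation_budget ≤ 0 ∨ (2 ≤ num_actions ∧ num_actions ≤ simulation_budget))
instance (num_actions : Int) (simulation_budget : Int) : Decidable (Pre_get_sequential_halving_simulations_for_levels num_actions simulation_budget) := by unfold Pre_get_sequential_halving_simulations_for_levels; infer_instance

def pvWitness_get_sequential_halving_simulations_for_levels : Int × Int := (8, 100)

def Spec_get_sequential_halving_simulations_for_levels (num_actions : Int) (simulation_budget : Int) (out : List Int × List Int) : Prop := out = get_sequential_halving_simulations_for_levels_alt num_actions simulation_budget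
instance (num_actions : Int) (simulation_budget : Int) (out : List Int × List Int) : Decidable (Spec_get_sequential_halving_simulations_for_levels num_actions simulation_budget out) := by unfold Spec_get_sequential_halving_simulations_for_levels; infer_instance

-- ===== CLAIM (what is proved, stated in full; the proofs are below) =====
def Claim_equal_get_sequential_halving_simulations_for_levels : Prop := ∀ (num_actions : Int) (simulation_budget : Int), Dom_get_sequential_halving_simulations_for_levels num_actions simulation_budget → Pre_get_sequential_halving_simulations_for_levels num_actions simulation_budget → Spec_get_sequential_halving_simulations_for_levels num_actions simulation_budget (get_sequential_halving_simulations_for_levels num_actions simulation_budget)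
-- ===== LEMMAS AND PROOFS =====

-- A's accumulating loop in terms of the accumulator-free recursion pvGo
def pvGo (nl sb : Int) : Nat → Int → Int → List Int × List Int × Int
  | 0, _, rb => ([], [], rb)
  | k + 1, a, rb =>
      if rb < a then ([], [], rb)
      else
        let s := max 1 (PySem.Int.floordiv sb (nl * a))
        let t := pvGo nl sb k (max 2 (PySem.Int.floordiv a 2)) (rb - s * a)
        (a :: t.1, s :: t.2.1, t.2.2)

theorem pvLoopA_eq_go (nl sb : Int) (k : Nat) (a rb : Int) (acc1 acc2 : List Int) :
    pvLoopA nl sb k a rb acc1 acc2 =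
      (acc1 ++ (pvGo nl sb k a rb).1, acc2 ++ (pvGo nl sb k a rb).2.1, (pvGo nl sb k a rb).2.2) := by
  induction k generalizing a rb acc1 acc2 with
  | zero => simp [pvLoopA, pvGo]
  | succ k ih =>
      simp only [pvLoopA, pvGo]
      split_ifs with h
      · simp
      · rw [ih]
        simp

-- closed form of A's iterated halving: one step of halving on pvSize k gives pvSize (k+1)
theorem pvSize_step (na : Int) (k : Nat) :
    pvSize na (k + 1) = max 2 (PySem.Int.floordiv (pvSize na k) 2) := by
  cases k with
  | zero => simp [pvSize]
  | succ k =>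
      have hP : (0:Int) < 2 ^ (k + 1) := by positivity
      simp only [pvSize, if_neg (Nat.succ_ne_zero _)]
      set P : Int := 2 ^ (k + 1) with hPdef
      have hPP : (2:Int) ^ (k + 1 + 1) = 2 * P := by rw [hPdef]; ring
      set q : Int := PySem.Int.floordiv na P with hq
      have hqb : q * P ≤ na ∧ na < (q + 1) * P :=
        (PySem.Int.floordiv_eq_iff_of_pos hP).mp hq.symm
      by_cases h2q : 2 ≤ q
      · have hmax : max 2 q = q := by omega
        rw [hmax]
        set p : Int := PySem.Int.floordiv q 2 with hp
        have hpb : p * 2 ≤ q ∧ q < (p + 1) * 2 :=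
          (PySem.Int.floordiv_eq_iff_of_pos (by norm_num)).mp hp.symm
        have hfl : PySem.Int.floordiv na (2 * P) = p := by
          rw [PySem.Int.floordiv_eq_iff_of_pos (by positivity)]
          constructor
          · calc p * (2 * P) = (p * 2) * P := by ring
              _ ≤ q * P := by
                  exact mul_le_mul_of_nonneg_right hpb.1 (le_of_lt hP)
              _ ≤ na := hqb.1
          · calc na < (q + 1) * P := hqb.2
              _ ≤ ((p + 1) * 2) * P := by
                  exact mul_le_mul_of_nonneg_right (by omega) (le_of_lt hP)
              _ = (p + 1) * (2 * P) := by ring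
        rw [hPP, hfl]
      · have hmax : max 2 q = 2 := by omega
        rw [hmax]
        have hfl : PySem.Int.floordiv na (2 * P) < 1 := by
          rw [PySem.Int.floordiv_lt_iff_lt_mul (by positivity)]
          calc na < (q + 1) * P := hqb.2
            _ ≤ 2 * P := by
                exact mul_le_mul_of_nonneg_right (by omega) (le_of_lt hP)
            _ = 1 * (2 * P) := by ring
        have h22 : PySem.Int.floordiv 2 2 = 1 := by decide
        rw [hPP, h22]
        omega

-- the closed-form recursion computes A's loop result level for level
theorem pvGoB_eq_go (na nl sb : Int) (fuel k : Nat) (rb : Int) :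
    pvGoB na nl sb fuel k rb = pvGo nl sb fuel (pvSize na k) rb := by
  induction fuel generalizing k rb with
  | zero => simp [pvGoB, pvGo]
  | succ fuel ih =>
      simp only [pvGoB, pvGo]
      by_cases h : rb < pvSize na k
      · rw [if_pos h, if_pos h]
      · rw [if_neg h, if_neg h]
        rw [← pvSize_step na k]
        rw [mul_comm (pvSize na k) (max 1 (PySem.Int.floordiv sb (nl * pvSize na k)))]
        rw [ih]

-- ===== VERDICT (by name: the statement is the Claim_ definition above) =====
theorem get_sequential_halving_simulations_for_levels_spec : Claim_equal_get_sequential_halving_simulations_for_levels := by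
  intro na sb _ hpre
  unfold Spec_get_sequential_halving_simulations_for_levels
  unfold get_sequential_halving_simulations_for_levels get_sequential_halving_simulations_for_levels_alt
  dsimp only
  rw [pvLoopA_eq_go, pvGoB_eq_go]
  have hsz : pvSize na 0 = na := by simp [pvSize]
  rw [hsz]
  simp only [List.nil_append]
  set t := pvGo ((Nat.log2 na.toNat : Nat) : Int) sb (((Nat.log2 na.toNat : Nat) : Int)).toNat na sb with ht
  split_ifs with h
  · rcases hA : t.1.getLast? with _ | al <;> rcases hB : t.2.1.getLast? with _ | sl <;> simp [hA, hB]
  · rfl
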